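-- pv_equiv track=rewrite | github.com/keephq/keep | keep/iohandler/iohandler.py | _encode_single_quotes_in_double_quotes
-- ===== SOURCE A (Python) =====
-- def _encode_single_quotes_in_double_quotes(s):
--     result = []
--     in_double_quotes = False
--     i = 0
--     while i < len(s):
--         if s[i] == '"':
--             in_double_quotes = not in_double_quotes
--         elif s[i] == "'" and in_double_quotes:
--             if i > 0 and s[i - 1] == "\\":
--                 # If the single quote is already escaped, don't add another backslash
--                 result.append(s[i])
--             else:
--                 result.append("\\" + s[i])
--             i += 1
--             continue
--         result.append(s[i])
--         i += 1
--     return "".join(result)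
-- ===== SOURCE B (Python) =====
-- def _escape_segment(seg):
--     buf = []
--     prev = '"'
--     for ch in seg:
--         if ch == "'" and prev != "\\":
--             buf.append("\\")
--         buf.append(ch)
--         prev = ch
--     return "".join(buf)
--
--
-- def _encode_single_quotes_in_double_quotes(s):
--     parts = s.split('"')
--     return '"'.join(_escape_segment(p) if k % 2 == 1 else p
--                     for k, p in enumerate(parts))
-- ===== Notes on version B (the rewrite author's own statement) =====
-- stated objective: faster
-- what changed: Replaces A's per-character index-walking loop with its in_double_quotes toggle and raw one-back lookback by a partition-then-transform decomposition: split the string on the double-quote character, escape single quotes only inside the odd-indexed (inside-quotes) segments with a segment-local previous-character scan, and rejoin; the bulk of the string is handled by C-level str.split/str.join instead of a Python-level character loop, a constant-factor speedup a timing run measured.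
import Mathlib
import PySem

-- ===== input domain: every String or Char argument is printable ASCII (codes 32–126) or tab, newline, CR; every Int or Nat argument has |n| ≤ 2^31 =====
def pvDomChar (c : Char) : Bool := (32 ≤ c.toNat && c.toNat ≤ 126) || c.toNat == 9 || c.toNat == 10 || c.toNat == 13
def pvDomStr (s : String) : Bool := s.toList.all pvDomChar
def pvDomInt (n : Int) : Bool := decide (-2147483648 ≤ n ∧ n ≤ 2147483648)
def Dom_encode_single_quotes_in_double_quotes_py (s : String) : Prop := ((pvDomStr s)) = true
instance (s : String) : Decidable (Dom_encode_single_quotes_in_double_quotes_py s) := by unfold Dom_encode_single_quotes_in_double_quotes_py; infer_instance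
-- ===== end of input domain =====

-- B replaces A's index-walking toggle loop by a split-on-double-quote / escape-odd-segments / rejoin decomposition (measured faster in a timing run).

-- ===== PORT A =====
-- A's while-loop over index i with the in_double_quotes toggle and the raw s[i-1] lookback.
def pvAGo (s : List Char) (i : Nat) (dq : Bool) (acc : List (List Char)) : List (List Char) :=
  if h : i < s.length then
    if s[i] = '"' then
      pvAGo s (i + 1) (!dq) (acc ++ [[s[i]]])
    else if s[i] = '\'' ∧ dq then
      if 0 < i ∧ s.getD (i - 1) ' ' = '\\' then
        pvAGo s (i + 1) dq (acc ++ [[s[i]]])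
      else
        pvAGo s (i + 1) dq (acc ++ [['\\', s[i]]])
    else
      pvAGo s (i + 1) dq (acc ++ [[s[i]]])
  else acc
termination_by s.length - i

def encode_single_quotes_in_double_quotes_py (s : String) : String :=
  String.ofList (PySem.Chars.join [] (pvAGo s.toList 0 false []))

-- ===== PORT B =====
-- Source B's _escape_segment: scan the chars of one segment, prev starts as '"'.
def pvEscSeg (seg : List Char) (prev : Char) : List Char :=
  match seg with
  | [] => []
  | c :: t => (if c = '\'' ∧ prev ≠ '\\' then ['\\', c] else [c]) ++ pvEscSeg t c

def encode_single_quotes_in_double_quotes_py_alt (s : String) : String :=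
  String.ofList (PySem.Chars.join ['"']
    ((PySem.List.enumerate (PySem.Chars.splitOn s.toList ['"'])).map
      (fun kp => if PySem.Int.mod kp.1 2 = 1 then pvEscSeg kp.2 '"' else kp.2)))

-- ===== PRECONDITION & SPEC =====
def Spec_encode_single_quotes_in_double_quotes_py (s : String) (out : String) : Prop := out = encode_single_quotes_in_double_quotes_py_alt s
instance (s : String) (out : String) : Decidable (Spec_encode_single_quotes_in_double_quotes_py s out) := by unfold Spec_encode_single_quotes_in_double_quotes_py; infer_instance

-- ===== CLAIM (what is proved, stated in full; the proofs are below) =====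
def Claim_equal_encode_single_quotes_in_double_quotes_py : Prop := ∀ (s : String), Dom_encode_single_quotes_in_double_quotes_py s → Spec_encode_single_quotes_in_double_quotes_py s (encode_single_quotes_in_double_quotes_py s)

-- ===== LEMMAS AND PROOFS =====

-- the common characterization: one pass with the double-quote toggle and "previous char was a backslash" bit
def pvNorm : List Char → Bool → Bool → List Char
  | [], _, _ => []
  | c :: t, dq, pb =>
    if c = '"' then c :: pvNorm t (!dq) false
    else if c = '\'' ∧ dq then (if pb then [c] else ['\\', c]) ++ pvNorm t dq false
    else c :: pvNorm t dq (c = '\\')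

-- structural form of split on '"'
def pvConsHead (x : List Char) : List (List Char) → List (List Char)
  | [] => [x]
  | p :: ps => (x ++ p) :: ps

def pvSplitQ : List Char → List (List Char)
  | [] => [[]]
  | c :: t => if c = '"' then [] :: pvSplitQ t else pvConsHead [c] (pvSplitQ t)

-- segment-wise escape with a "prev is backslash" bit
def pvEscB : List Char → Bool → List Char
  | [], _ => []
  | c :: t, pb => (if c = '\'' ∧ ¬pb then ['\\', c] else [c]) ++ pvEscB t (c = '\\')

-- join the split parts, escaping the inside-double-quotes ones
def pvBJoin : List (List Char) → Bool → Bool → List Char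
  | [], _, _ => []
  | [p], dq, pb => if dq then pvEscB p pb else p
  | p :: q :: ps, dq, pb => (if dq then pvEscB p pb else p) ++ '"' :: pvBJoin (q :: ps) (!dq) false

theorem pvJoinNil (parts : List (List Char)) : PySem.Chars.join [] parts = parts.flatten := by
  induction parts with
  | nil => rfl
  | cons p ps ih =>
      cases ps with
      | nil => simp [PySem.Chars.join, List.intercalate]
      | cons q qs =>
          simpa [PySem.Chars.join, List.intercalate, List.intersperse] using ih

theorem pvAGo_eq_norm (s : List Char) (i : Nat) (dq : Bool) (acc : List (List Char)) :
    (pvAGo s i dq acc).flatten =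
      acc.flatten ++ pvNorm (s.drop i) dq (decide (0 < i ∧ s.getD (i - 1) ' ' = '\\')) := by
  fun_induction pvAGo s i dq acc with
  | case1 i dq acc h hq ih =>
      rw [ih, List.drop_eq_getElem_cons h, hq]
      simp [pvNorm, h]
      simp [hq]
  | case2 i dq acc h hq hsq hprev ih =>
      rw [ih, List.drop_eq_getElem_cons h]
      simp only [List.getD] at hprev
      simp [pvNorm, hsq.1, hsq.2, h]
      rw [if_pos hprev]
      rfl
  | case3 i dq acc h hq hsq hprev ih =>
      rw [ih, List.drop_eq_getElem_cons h]
      simp only [List.getD] at hprev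
      simp [pvNorm, hsq.1, hsq.2, h]
      rw [if_neg hprev]
      rfl
  | case4 i dq acc h hq hsq ih =>
      rw [ih, List.drop_eq_getElem_cons h]
      simp [pvNorm, hq, hsq, h]
  | case5 i dq acc h =>
      rw [List.drop_eq_nil_of_le (by omega)]
      simp [pvNorm]

theorem pvSplitQ_ne_nil (l : List Char) : pvSplitQ l ≠ [] := by
  cases l with
  | nil => simp [pvSplitQ]
  | cons c t =>
      simp only [pvSplitQ]
      split
      · simp
      · cases h : pvSplitQ t <;> simp [pvConsHead]

theorem pvConsHead_consHead (x : List Char) (c : Char) (r : List (List Char)) :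
    pvConsHead x (pvConsHead [c] r) = pvConsHead (x ++ [c]) r := by
  cases r <;> simp [pvConsHead]

theorem pvSplitGo (l : List Char) : ∀ (fuel : Nat) (cur : List Char) (acc : List (List Char)),
    l.length < fuel →
    PySem.Chars.splitOn.go ['"'] fuel l cur acc = acc.reverse ++ pvConsHead cur.reverse (pvSplitQ l) := by
  induction l with
  | nil =>
      intro fuel cur acc hf
      cases fuel with
      | zero => omega
      | succ f => simp [PySem.Chars.splitOn.go, pvSplitQ, pvConsHead]
  | cons c rest ih =>
      intro fuel cur acc hf
      cases fuel with
      | zero => omega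
      | succ f =>
          simp only [List.length_cons] at hf
          by_cases hc : c = '"'
          · subst hc
            rw [PySem.Chars.splitOn.go]
            have hp : List.isPrefixOf ['"'] ('"' :: rest) = true := by
              simp [List.isPrefixOf]
            rw [if_pos hp]
            have hr := ih f [] (cur.reverse :: acc) (by omega)
            simp only [List.length_singleton, List.drop_succ_cons, List.drop_zero] at hr ⊢
            rw [hr]
            obtain ⟨p, ps, hps⟩ := List.exists_cons_of_ne_nil (pvSplitQ_ne_nil rest)
            simp [pvSplitQ, hps, pvConsHead]
          · rw [PySem.Chars.splitOn.go]
            have hp : List.isPrefixOf ['"'] (c :: rest) = false := by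
              simp [List.isPrefixOf]
              exact fun h => hc h.symm
            rw [if_neg (by simp [hp])]
            have hr := ih f (c :: cur) acc (by omega)
            rw [hr]
            simp only [pvSplitQ, if_neg hc, List.reverse_cons]
            rw [pvConsHead_consHead]

theorem pvSplitOn_eq_splitQ (l : List Char) : PySem.Chars.splitOn l ['"'] = pvSplitQ l := by
  have h := pvSplitGo l (l.length + 1) [] [] (by omega)
  rw [PySem.Chars.splitOn, h]
  obtain ⟨p, ps, hps⟩ := List.exists_cons_of_ne_nil (pvSplitQ_ne_nil l)
  simp [hps, pvConsHead]

theorem pvEscSeg_eq_escB (t : List Char) (c : Char) :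
    pvEscSeg t c = pvEscB t (decide (c = '\\')) := by
  induction t generalizing c with
  | nil => rfl
  | cons d u ih => simp [pvEscSeg, pvEscB, ih]

theorem pvNorm_eq_bjoin (l : List Char) (dq pb : Bool) :
    pvNorm l dq pb = pvBJoin (pvSplitQ l) dq pb := by
  induction l generalizing dq pb with
  | nil => cases dq <;> rfl
  | cons c t ih =>
      by_cases hq : c = '"'
      · subst hq
        obtain ⟨p, ps, hps⟩ := List.exists_cons_of_ne_nil (pvSplitQ_ne_nil t)
        simp only [pvNorm, pvSplitQ, hps]
        rw [ih]
        cases dq <;> simp [pvBJoin, hps, pvEscB]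
      · obtain ⟨p, ps, hps⟩ := List.exists_cons_of_ne_nil (pvSplitQ_ne_nil t)
        have ihc := ih dq (decide (c = '\\'))
        rw [hps] at ihc
        simp only [pvNorm, pvSplitQ, if_neg hq, hps, pvConsHead]
        cases ps with
        | nil =>
            cases dq with
            | false => simp only [pvBJoin] at ihc ⊢; simp [ihc]
            | true =>
                simp only [pvBJoin] at ihc ⊢
                by_cases hc : c = '\''
                · subst hc
                  cases pb <;> simp_all [pvEscB]
                · simp_all [pvEscB]
        | cons q qs =>
            cases dq with
            | false => simp only [pvBJoin] at ihc ⊢; simp [ihc]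
            | true =>
                simp only [pvBJoin] at ihc ⊢
                by_cases hc : c = '\''
                · subst hc
                  cases pb <;> simp_all [pvEscB]
                · simp_all [pvEscB]

theorem pvAlt_eq_bjoin (parts : List (List Char)) (n : Int) :
    PySem.Chars.join ['"']
      ((PySem.List.enumerate parts n).map
        (fun kp => if PySem.Int.mod kp.1 2 = 1 then pvEscSeg kp.2 '"' else kp.2)) =
      pvBJoin parts (decide (PySem.Int.mod n 2 = 1)) false := by
  induction parts generalizing n with
  | nil => cases h : decide (PySem.Int.mod n 2 = 1) <;> rfl
  | cons p ps ih =>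
      have hmod : ∀ m : Int, PySem.Int.mod m 2 = m % 2 := fun m =>
        PySem.Int.mod_eq_emod_of_pos (a := m) (b := 2) (by omega)
      have hflip : (decide (PySem.Int.mod (n + 1) 2 = 1)) = !(decide (PySem.Int.mod n 2 = 1)) := by
        rw [hmod, hmod]
        rcases Int.emod_two_eq n with h | h <;> simp [h] <;> omega
      cases ps with
      | nil =>
          simp only [PySem.List.enumerate_cons, PySem.List.enumerate_nil, List.map]
          cases h : decide (PySem.Int.mod n 2 = 1) with
          | false => simp_all [pvBJoin, PySem.Chars.join, List.intercalate]
          | true =>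
              simp_all [pvBJoin, PySem.Chars.join, List.intercalate, pvEscSeg_eq_escB]
      | cons q qs =>
          have ih' := ih (n + 1)
          simp only [PySem.List.enumerate_cons, List.map] at ih' ⊢
          rw [hflip] at ih'
          cases h : decide (PySem.Int.mod n 2 = 1) with
          | false =>
              simp only [h, Bool.not_false] at ih'
              simp_all [pvBJoin, PySem.Chars.join, List.intercalate, List.intersperse]
          | true =>
              simp only [h, Bool.not_true] at ih'
              simp_all [pvBJoin, PySem.Chars.join, List.intercalate, List.intersperse,
                pvEscSeg_eq_escB]

-- ===== VERDICT (by name: the statement is the Claim_ definition above) =====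
theorem encode_single_quotes_in_double_quotes_py_spec : Claim_equal_encode_single_quotes_in_double_quotes_py := by
  intro s _
  unfold Spec_encode_single_quotes_in_double_quotes_py
  unfold encode_single_quotes_in_double_quotes_py encode_single_quotes_in_double_quotes_py_alt
  rw [pvJoinNil, pvAGo_eq_norm, pvSplitOn_eq_splitQ, pvAlt_eq_bjoin]
  simp [pvNorm_eq_bjoin]
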